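-- pv_equiv track=rewrite | github.com/Haylia/chtimerbot | new bot.py | parse_offset
-- ===== SOURCE A (Python) =====
-- def parse_offset(text):
--     """Parse a time offset string like '5m', '30s', '1h', or '1h30m' into seconds.
--     Returns 0 if the format is not recognised."""
--     if not text:
--         return 0
--     text = text.lower().strip()
--     total = 0
--     current_num = ""
--     for char in text:
--         if char.isdigit():
--             current_num += char
--         elif char in ("h", "m", "s") and current_num:
--             num = int(current_num)
--             if char == "h":
--                 total += num * 3600
--             elif char == "m":
--                 total += num * 60
--             elif char == "s":
--                 total += num
--             current_num = ""
--         else: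
--             return 0  # unrecognised character, not a valid offset
--     # If there are leftover digits with no unit, treat as minutes for backwards compat
--     if current_num:
--         return 0  # ambiguous bare number, ignore it
--     return total
-- ===== SOURCE B (Python) =====
-- import re
--
-- _MULT = {"h": 3600, "m": 60, "s": 1}
--
-- def parse_offset(text):
--     if not text:
--         return 0
--     text = text.lower().strip()
--     if re.fullmatch(r"(\d+[hms])*", text) is None:
--         return 0
--     return sum(int(num) * _MULT[unit] for num, unit in re.findall(r"(\d+)([hms])", text))
-- ===== Notes on version B (the rewrite author's own statement) =====
-- stated objective: idiomatic
-- what changed: Replaced the hand-written per-character state machine (digit accumulator, early returns) with a two-pass regex formulation: re.fullmatch validates the whole string against (\d+[hms])*, then re.findall tokenizes it into (digits, unit) pairs which are summed with a unit->multiplier dict.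
import Mathlib
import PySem

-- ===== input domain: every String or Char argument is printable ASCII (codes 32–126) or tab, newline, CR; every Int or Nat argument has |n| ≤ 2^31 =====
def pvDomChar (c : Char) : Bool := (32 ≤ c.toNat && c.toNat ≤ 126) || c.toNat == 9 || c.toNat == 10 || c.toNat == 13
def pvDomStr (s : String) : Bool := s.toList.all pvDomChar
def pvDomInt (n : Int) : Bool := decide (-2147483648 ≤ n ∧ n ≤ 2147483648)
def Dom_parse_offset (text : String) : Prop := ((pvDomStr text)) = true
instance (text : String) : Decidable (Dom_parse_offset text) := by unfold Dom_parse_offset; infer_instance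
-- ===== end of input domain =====

-- B replaces A's per-character state machine by a two-pass regex-style formulation
-- (validate the whole string, then sum the (digits, unit) tokens); same value everywhere.

-- ===== PORT A =====
-- loop body of A: state = some (total, current_num) while running, none after 'return 0'
def pvStepA (st : Option (Int × List Char)) (c : Char) : Option (Int × List Char) :=
  match st with
  | none => none
  | some (total, cn) =>
    if PySem.Chars.isdigit c then some (total, cn ++ [c])
    else if (c == 'h' || c == 'm' || c == 's') && !cn.isEmpty then
      -- int(current_num): cn is a nonempty digit run here, so ofStr? is some; getD only totalizes
      let num := (PySem.Int.ofStr? (String.ofList cn)).getD 0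
      if c == 'h' then some (total + num * 3600, [])
      else if c == 'm' then some (total + num * 60, [])
      else some (total + num, [])
    else none

def pvFinishA (st : Option (Int × List Char)) : Int :=
  match st with
  | none => 0
  | some (total, cn) => if cn.isEmpty then total else 0

def parse_offset (text : String) : Int :=
  if text = "" then 0
  else
    let t := PySem.Str.strip (PySem.Str.lower text)
    pvFinishA (t.toList.foldl pvStepA (some (0, [])))

-- ===== PORT B =====
-- hand port of re.fullmatch(r"(\d+[hms])*", t): exact for this pattern (maximal digit run
-- then one unit letter, repeated to the end of the string)
def pvValid (cs : List Char) : Bool :=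
  match cs with
  | [] => true
  | c :: cs' =>
    if hdc : PySem.Chars.isdigit c then
      match h : List.drop (List.takeWhile PySem.Chars.isdigit (c :: cs')).length (c :: cs') with
      | [] => false
      | u :: rest => (u == 'h' || u == 'm' || u == 's') && pvValid rest
    else false
termination_by cs.length
decreasing_by
  have h1 : 1 ≤ (List.takeWhile PySem.Chars.isdigit (c :: cs')).length := by
    simp [*]
  have h2 := congrArg List.length h
  simp [List.length_drop] at h2
  simp; omega

def pvMult (u : Char) : Int := if u == 'h' then 3600 else if u == 'm' then 60 else 1

-- hand port of summing over re.findall(r"(\d+)([hms])", t): exact for this pattern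
-- (a maximal digit run matches only if the next char is a unit; otherwise the scan moves on)
def pvSum (cs : List Char) : Int :=
  match cs with
  | [] => 0
  | c :: cs' =>
    if hdc : PySem.Chars.isdigit c then
      match h : List.drop (List.takeWhile PySem.Chars.isdigit (c :: cs')).length (c :: cs') with
      | [] => 0
      | u :: rest =>
        if u == 'h' || u == 'm' || u == 's' then
          (PySem.Int.ofStr? (String.ofList (List.takeWhile PySem.Chars.isdigit (c :: cs')))).getD 0
            * pvMult u + pvSum rest
        else pvSum rest
    else pvSum cs'
termination_by cs.length
decreasing_by
  · have h1 : 1 ≤ (List.takeWhile PySem.Chars.isdigit (c :: cs')).length := by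
      simp [*]
    have h2 := congrArg List.length h
    simp [List.length_drop] at h2
    simp; omega
  · have h1 : 1 ≤ (List.takeWhile PySem.Chars.isdigit (c :: cs')).length := by
      simp [*]
    have h2 := congrArg List.length h
    simp [List.length_drop] at h2
    simp; omega
  · simp

def parse_offset_alt (text : String) : Int :=
  if text = "" then 0
  else
    let t := PySem.Str.strip (PySem.Str.lower text)
    if pvValid t.toList then pvSum t.toList else 0

-- ===== PRECONDITION & SPEC =====
def Spec_parse_offset (text : String) (out : Int) : Prop := out = parse_offset_alt text
instance (text : String) (out : Int) : Decidable (Spec_parse_offset text out) := by unfold Spec_parse_offset; infer_instance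

-- ===== CLAIM (what is proved, stated in full; the proofs are below) =====
def Claim_equal_parse_offset : Prop := ∀ (text : String), Dom_parse_offset text → Spec_parse_offset text (parse_offset text)

-- ===== LEMMAS AND PROOFS =====

theorem pv_foldl_none (cs : List Char) : cs.foldl pvStepA none = none := by
  induction cs with
  | nil => rfl
  | cons c cs ih => simpa [pvStepA] using ih

theorem pv_takeWhile_all {ds : List Char} (hd : ds.all PySem.Chars.isdigit = true) :
    List.takeWhile PySem.Chars.isdigit ds = ds := by
  induction ds with
  | nil => rfl
  | cons d ds ih =>
    simp only [List.all_cons, Bool.and_eq_true] at hd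
    simp [hd.1, ih hd.2]

theorem pv_takeWhile_run {ds : List Char} (hd : ds.all PySem.Chars.isdigit = true)
    {c : Char} (hc : PySem.Chars.isdigit c = false) (cs : List Char) :
    List.takeWhile PySem.Chars.isdigit (ds ++ c :: cs) = ds := by
  induction ds with
  | nil => simp [hc]
  | cons d ds ih =>
    simp only [List.all_cons, Bool.and_eq_true] at hd
    simp [hd.1, ih hd.2]

theorem pvValid_nil : pvValid [] = true := by rw [pvValid.eq_def]

theorem pvSum_nil : pvSum [] = 0 := by rw [pvSum.eq_def]

theorem pvValid_not_digit {c : Char} (hc : PySem.Chars.isdigit c = false) (cs : List Char) :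
    pvValid (c :: cs) = false := by
  rw [pvValid.eq_def]; simp [hc]

theorem pvValid_all_digits {d : Char} {ds : List Char}
    (hd : (d :: ds).all PySem.Chars.isdigit = true) : pvValid (d :: ds) = false := by
  have hdig : PySem.Chars.isdigit d = true := by
    simp only [List.all_cons, Bool.and_eq_true] at hd; exact hd.1
  rw [pvValid.eq_def]
  simp only [hdig, reduceDIte]
  split
  · rfl
  · next u rest heq =>
      rw [pv_takeWhile_all hd, List.drop_length] at heq
      cases heq

theorem pvValid_run {d : Char} {ds : List Char} {c : Char}
    (hd : (d :: ds).all PySem.Chars.isdigit = true) (hc : PySem.Chars.isdigit c = false)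
    (cs : List Char) :
    pvValid ((d :: ds) ++ c :: cs) = ((c == 'h' || c == 'm' || c == 's') && pvValid cs) := by
  have hdig : PySem.Chars.isdigit d = true := by
    simp only [List.all_cons, Bool.and_eq_true] at hd; exact hd.1
  have htw := pv_takeWhile_run hd hc cs
  have hdrop : List.drop (d :: ds).length ((d :: ds) ++ c :: cs) = c :: cs := by simp
  rw [pvValid.eq_def]
  simp only [List.cons_append] at htw hdrop ⊢
  simp only [hdig, reduceDIte]
  split
  · next heq => rw [htw, hdrop] at heq; cases heq
  · next u rest heq =>
      rw [htw, hdrop] at heq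
      injection heq with h1 h2
      subst h1; subst h2
      rfl

theorem pvSum_run {d : Char} {ds : List Char} {c : Char}
    (hd : (d :: ds).all PySem.Chars.isdigit = true) (hc : PySem.Chars.isdigit c = false)
    (cs : List Char) :
    pvSum ((d :: ds) ++ c :: cs) =
      (if (c == 'h' || c == 'm' || c == 's') then
        (PySem.Int.ofStr? (String.ofList (d :: ds))).getD 0 * pvMult c + pvSum cs
      else pvSum cs) := by
  have hdig : PySem.Chars.isdigit d = true := by
    simp only [List.all_cons, Bool.and_eq_true] at hd; exact hd.1
  have htw := pv_takeWhile_run hd hc cs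
  have hdrop : List.drop (d :: ds).length ((d :: ds) ++ c :: cs) = c :: cs := by simp
  rw [pvSum.eq_def]
  simp only [List.cons_append] at htw hdrop ⊢
  simp only [hdig, reduceDIte]
  split
  · next heq => rw [htw, hdrop] at heq; cases heq
  · next u rest heq =>
      rw [htw, hdrop] at heq
      injection heq with h1 h2
      subst h1; subst h2
      rw [htw]

theorem pv_key (cs : List Char) : ∀ (total : Int) (ds : List Char),
    ds.all PySem.Chars.isdigit = true →
    pvFinishA (cs.foldl pvStepA (some (total, ds))) =
      (if pvValid (ds ++ cs) then total + pvSum (ds ++ cs) else 0) := by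
  induction cs with
  | nil =>
    intro total ds hd
    match ds with
    | [] => simp [pvFinishA, pvValid_nil, pvSum_nil]
    | d :: ds' =>
      simp [pvFinishA, pvValid_all_digits hd]
  | cons c cs' ih =>
    intro total ds hd
    by_cases hdc : PySem.Chars.isdigit c = true
    · -- digit: A appends to current_num; on the B side regroup the list
      have hre : ds ++ c :: cs' = (ds ++ [c]) ++ cs' := by simp
      rw [hre]
      have hstep : pvStepA (some (total, ds)) c = some (total, ds ++ [c]) := by
        simp [pvStepA, hdc]
      rw [List.foldl_cons, hstep]
      exact ih total (ds ++ [c]) (by simp_all)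
    · have hdc' : PySem.Chars.isdigit c = false := by simpa using hdc
      by_cases hu : (c == 'h' || c == 'm' || c == 's') = true
      · match ds with
        | [] =>
          -- unit with no pending digits: A returns 0; B's validator fails at c
          have hstep : pvStepA (some (total, ([] : List Char))) c = none := by
            simp [pvStepA, hdc']
          rw [List.foldl_cons, hstep, pv_foldl_none]
          rw [List.nil_append, pvValid_not_digit hdc']
          simp [pvFinishA]
        | d :: ds' =>
          -- unit closing a digit run: both sides consume the run and the unit
          have hstep : pvStepA (some (total, d :: ds')) c =
              some (total + (PySem.Int.ofStr? (String.ofList (d :: ds'))).getD 0 * pvMult c, []) := by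
            have h9 : PySem.Chars.isdigit 'h' = false := by decide
            have h10 : PySem.Chars.isdigit 'm' = false := by decide
            have h11 : PySem.Chars.isdigit 's' = false := by decide
            rcases (by simpa using hu : (c = 'h' ∨ c = 'm') ∨ c = 's') with (h | h) | h <;>
              subst h <;> simp [pvStepA, pvMult, h9, h10, h11]
          rw [List.foldl_cons, hstep]
          rw [ih _ [] (by simp), List.nil_append]
          rw [pvValid_run hd hdc', pvSum_run hd hdc', hu]
          simp only [Bool.true_and, if_true]
          split
          · ring
          · rfl
      · -- unrecognised char: A returns 0; B's validator fails
        have hu' : (c == 'h' || c == 'm' || c == 's') = false := by simpa using hu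
        have hstep : pvStepA (some (total, ds)) c = none := by
          simp [pvStepA, hdc', hu']
        rw [List.foldl_cons, hstep, pv_foldl_none]
        have hv : pvValid (ds ++ c :: cs') = false := by
          match ds with
          | [] => rw [List.nil_append]; exact pvValid_not_digit hdc' cs'
          | d :: ds' => rw [pvValid_run hd hdc', hu']; simp
        simp [pvFinishA, hv]

theorem pv_key0 (cs : List Char) :
    pvFinishA (cs.foldl pvStepA (some (0, []))) = (if pvValid cs then pvSum cs else 0) := by
  have hk := pv_key cs 0 [] (by simp)
  rw [List.nil_append] at hk
  rw [hk]
  split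
  · omega
  · rfl

-- ===== VERDICT (by name: the statement is the Claim_ definition above) =====
theorem parse_offset_spec : Claim_equal_parse_offset := by
  intro text _
  unfold Spec_parse_offset parse_offset parse_offset_alt
  by_cases h : text = ""
  · simp [h]
  · simp only [h, if_false]
    exact pv_key0 _
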